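-- pv_equiv track=rewrite | github.com/ibtSdan/1Day1Problem | 프로그래머스/0/120843. 공 던지기/공 던지기.py | solution
-- ===== SOURCE A (Python) =====
-- def solution(numbers, k):
--     index = 0
--     for _ in range(k-1):
--         if index==len(numbers)-1:
--             index = 1
--         elif index==len(numbers)-2:
--             index = 0
--         else:
--             index += 2
--     return index+1
-- ===== SOURCE B (Python) =====
-- def solution(numbers, k):
--     # closed form: each of the max(k-1, 0) throws advances the holder by 2 (mod circle size)
--     return 2 * max(k - 1, 0) % len(numbers) + 1
-- ===== Notes on version B (the rewrite author's own statement) =====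
-- stated objective: faster
-- what changed: replaced the O(k) step-by-step simulation of the throws with the closed form 2*max(k-1,0) % len(numbers) + 1.
-- intended difference: On single-element lists with k >= 2, A returns 2*k-2 because its index walks past the only position; B returns 1, the only person who can ever hold the ball. — e.g. on solution([5], 2): A returns 2, B returns 1
-- outside the precondition, e.g. on solution([], 3): A returns 5, B raises ZeroDivisionError
import Mathlib
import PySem

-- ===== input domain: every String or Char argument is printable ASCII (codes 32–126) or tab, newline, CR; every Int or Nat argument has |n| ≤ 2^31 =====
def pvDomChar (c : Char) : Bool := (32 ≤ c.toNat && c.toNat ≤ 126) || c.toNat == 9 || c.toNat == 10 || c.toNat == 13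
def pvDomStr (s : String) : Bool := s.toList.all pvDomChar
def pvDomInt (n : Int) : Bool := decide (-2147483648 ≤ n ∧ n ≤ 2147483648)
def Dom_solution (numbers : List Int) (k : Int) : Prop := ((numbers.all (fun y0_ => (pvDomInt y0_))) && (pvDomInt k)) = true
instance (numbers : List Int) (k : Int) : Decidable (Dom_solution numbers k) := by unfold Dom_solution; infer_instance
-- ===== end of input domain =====

-- B replaces A's O(k) throw-by-throw simulation with the O(1) closed form 2*max(k-1,0) % n + 1.

-- ===== PORT A =====
def solution (numbers : List Int) (k : Int) : Int :=
  ((PySem.List.pyRange 0 (k - 1) 1).foldl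
    (fun index _ =>
      if index = (numbers.length : Int) - 1 then 1
      else if index = (numbers.length : Int) - 2 then 0
      else index + 2) 0) + 1

-- ===== PORT B =====
def solution_alt (numbers : List Int) (k : Int) : Int :=
  PySem.Int.mod (2 * max (k - 1) 0) (numbers.length : Int) + 1

-- ===== PRECONDITION & SPEC =====
-- Pre_ excludes the empty list, on which A returns 2*k-1 (its index just grows) while B's '%' raises ZeroDivisionError.
def Pre_solution (numbers : List Int) (k : Int) : Prop := numbers ≠ []
instance (numbers : List Int) (k : Int) : Decidable (Pre_solution numbers k) := by unfold Pre_solution; infer_instance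
def pvWitness_solution : List Int × Int := ([1, 2, 3], 2)

-- On single-element lists with k >= 2, A returns 2*k-2 because its index walks past the only position; B returns 1, the only person who can ever hold the ball.
def D_solution (numbers : List Int) (k : Int) : Prop := numbers.length = 1 ∧ 2 ≤ k
instance (numbers : List Int) (k : Int) : Decidable (D_solution numbers k) := by unfold D_solution; infer_instance
def Spec_solution (numbers : List Int) (k : Int) (out : Int) : Prop := ¬ D_solution numbers k → out = solution_alt numbers k
instance (numbers : List Int) (k : Int) (out : Int) : Decidable (Spec_solution numbers k out) := by unfold Spec_solution; infer_instance
def pvDiffWitness_solution : List Int × Int := ([5], 2)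
def pvDiffWitnessOut_solution : Int × Int := (2, 1)

-- ===== CLAIM (what is proved, stated in full; the proofs are below) =====
def Claim_unchanged_solution : Prop := ∀ (numbers : List Int) (k : Int), Dom_solution numbers k → Pre_solution numbers k → Spec_solution numbers k (solution numbers k)
def Claim_changed_solution : Prop := Dom_solution (pvDiffWitness_solution.1) (pvDiffWitness_solution.2) ∧ Pre_solution (pvDiffWitness_solution.1) (pvDiffWitness_solution.2) ∧ D_solution (pvDiffWitness_solution.1) (pvDiffWitness_solution.2) ∧ solution (pvDiffWitness_solution.1) (pvDiffWitness_solution.2) = pvDiffWitnessOut_solution.1 ∧ solution_alt (pvDiffWitness_solution.1) (pvDiffWitness_solution.2) = pvDiffWitnessOut_solution.2 ∧ pvDiffWitnessOut_solution.1 ≠ pvDiffWitnessOut_solution.2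
def Claim_exact_solution : Prop := ∀ (numbers : List Int) (k : Int), Dom_solution numbers k → Pre_solution numbers k → D_solution numbers k → solution numbers k ≠ solution_alt numbers k

-- ===== LEMMAS AND PROOFS =====

-- loop invariant for n ≥ 2: the fold computes (i + 2*|l|) mod n
theorem pv_fold_mod (n : Int) (hn : 2 ≤ n) (l : List Int) :
    ∀ (i : Int), 0 ≤ i → i < n →
      l.foldl (fun index _ =>
        if index = n - 1 then 1
        else if index = n - 2 then 0
        else index + 2) i = (i + 2 * l.length) % n := by
  induction l with
  | nil => intro i h0 h1; simp [Int.emod_eq_of_lt h0 h1]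
  | cons x l ih =>
    intro i h0 h1
    simp only [List.foldl_cons]
    have hstep : (if i = n - 1 then (1:Int) else if i = n - 2 then 0 else i + 2) = (i + 2) % n := by
      split_ifs with h h'
      · subst h
        rw [show n - 1 + 2 = 1 + n * 1 from by ring, Int.add_mul_emod_self_left,
          Int.emod_eq_of_lt (by omega) (by omega)]
      · subst h'
        rw [show n - 2 + 2 = n from by ring, Int.emod_self]
      · rw [Int.emod_eq_of_lt (by omega) (by omega)]
    rw [hstep, ih ((i + 2) % n) (Int.emod_nonneg _ (by omega)) (Int.emod_lt_of_pos _ (by omega))]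
    rw [Int.emod_add_emod]
    simp only [List.length_cons]
    push_cast
    ring_nf

-- for n = 1: once the index reaches 1 it just keeps adding 2
theorem pv_fold_one (l : List Int) :
    ∀ (i : Int), 1 ≤ i →
      l.foldl (fun index _ =>
        if index = (0:Int) then 1
        else if index = (-1:Int) then 0
        else index + 2) i = i + 2 * l.length := by
  induction l with
  | nil => intro i h; simp
  | cons x l ih =>
    intro i h
    simp only [List.foldl_cons]
    have : (if i = (0:Int) then (1:Int) else if i = (-1:Int) then 0 else i + 2) = i + 2 := by
      split_ifs <;> omega
    rw [this, ih (i + 2) (by omega)]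
    simp [List.length_cons]
    ring

theorem pv_max_toNat (k : Int) : max (k - 1) 0 = ((k - 1).toNat : Int) := by omega

theorem pv_mod_pos (a b : Int) (hb : 0 < b) : PySem.Int.mod a b = a % b :=
  PySem.Int.mod_eq_emod_of_pos hb

-- ===== VERDICT (by name: the statement is the Claim_ definition above) =====
theorem solution_spec : Claim_unchanged_solution := by
  intro numbers k _ hpre hnd
  unfold solution solution_alt
  have hlen : 1 ≤ numbers.length := List.length_pos_iff.mpr hpre
  have hrange : (PySem.List.pyRange 0 (k - 1) 1).length = (k - 1).toNat := by
    rw [PySem.List.length_pyRange_one]; norm_num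
  by_cases h2 : 2 ≤ (numbers.length : Int)
  · rw [pv_fold_mod (numbers.length : Int) h2 _ 0 le_rfl (by omega), hrange,
      pv_mod_pos _ _ (by omega), pv_max_toNat]
    norm_num
  · -- numbers.length = 1, and ¬ D_ forces k ≤ 1, so the range is empty
    have h1 : numbers.length = 1 := by omega
    have hk : k ≤ 1 := by
      by_contra hk
      exact hnd ⟨h1, by omega⟩
    rw [PySem.List.pyRange_one_eq_nil (by omega), h1]
    rw [pv_mod_pos _ _ (by norm_num), pv_max_toNat]
    simp

theorem solution_changed : Claim_changed_solution := by
  unfold Claim_changed_solution; decide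

theorem solution_tight : Claim_exact_solution := by
  intro numbers k _ _ hd
  obtain ⟨h1, hk⟩ := hd
  unfold solution solution_alt
  have hrw : (fun (index : Int) (_ : Int) =>
      if index = (numbers.length : Int) - 1 then (1:Int)
      else if index = (numbers.length : Int) - 2 then 0
      else index + 2) = (fun (index : Int) (_ : Int) =>
      if index = (0:Int) then (1:Int)
      else if index = (-1:Int) then 0
      else index + 2) := by
    funext index x
    simp [h1]
  rw [hrw]
  have hcons : PySem.List.pyRange 0 (k - 1) 1 = 0 :: PySem.List.pyRange 1 (k - 1) 1 := by
    exact PySem.List.pyRange_one_cons (by omega)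
  rw [hcons]
  simp only [List.foldl_cons]
  norm_num
  rw [pv_fold_one _ 1 le_rfl]
  rw [h1]
  simp
  have : (PySem.List.pyRange 1 (k - 1) 1).length = (k - 2).toNat := by
    rw [PySem.List.length_pyRange_one]; omega
  omega
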